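-- pv_equiv track=rewrite | github.com/rishabhouellette/fyi | core/auth.py | _is_public
-- ===== SOURCE A (Python) =====
-- _PUBLIC_PREFIXES = (
--     "/api/health",
--     "/docs",
--     "/openapi.json",
--     "/redoc",
--     "/oauth/",
--     "/l/",          # short-link redirects
--     "/assets/",     # React static assets
--     "/uploads/",    # media files (used by Meta preflight)
-- )
--
-- _PUBLIC_EXACT = {"/", "/favicon.ico"}
--
-- def _is_public(path: str) -> bool:
--     """Return True if *path* should bypass token auth."""
--     if path in _PUBLIC_EXACT:
--         return True
--     for prefix in _PUBLIC_PREFIXES: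
--         if path.startswith(prefix):
--             return True
--     # The SPA catch-all (non /api/* paths) is also public
--     if not path.startswith("/api/"):
--         return True
--     return False
-- ===== SOURCE B (Python) =====
-- def _is_public(path: str) -> bool:
--     """Return True if *path* should bypass token auth."""
--     # Only API paths can be private, and among those only the health-check prefix is public.
--     return path.startswith("/api/health") or not path.startswith("/api/")
-- ===== Notes on version B (the rewrite author's own statement) =====
-- stated objective: simpler
-- what changed: Collapsed the exact-path set and the prefix-tuple loop into a closed-form boolean of two prefix checks, using that every public table entry except the health-check prefix is a non-API path already covered by the SPA catch-all.
import Mathlib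
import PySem

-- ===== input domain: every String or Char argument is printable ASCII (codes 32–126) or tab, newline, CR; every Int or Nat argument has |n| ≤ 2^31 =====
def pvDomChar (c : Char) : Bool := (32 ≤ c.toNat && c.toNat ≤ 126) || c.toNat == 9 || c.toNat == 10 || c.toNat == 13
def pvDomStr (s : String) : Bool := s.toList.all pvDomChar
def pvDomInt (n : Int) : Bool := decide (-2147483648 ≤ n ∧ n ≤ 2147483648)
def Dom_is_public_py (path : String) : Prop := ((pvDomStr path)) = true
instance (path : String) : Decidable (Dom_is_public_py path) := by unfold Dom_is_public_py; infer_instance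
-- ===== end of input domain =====

-- B collapses A's exact-set test and prefix loop into two startswith checks (simpler; same results).

-- ===== PORT A =====
def pvPublicPrefixes : List String :=
  ["/api/health", "/docs", "/openapi.json", "/redoc", "/oauth/", "/l/", "/assets/", "/uploads/"]

def is_public_py (path : String) : Bool :=
  -- if path in _PUBLIC_EXACT: return True
  if path == "/" || path == "/favicon.ico" then true
  -- for prefix in _PUBLIC_PREFIXES: if path.startswith(prefix): return True
  else if pvPublicPrefixes.any (fun pfx => PySem.Str.startswith path pfx) then true
  -- if not path.startswith("/api/"): return True
  else if !(PySem.Str.startswith path "/api/") then true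
  else false

-- ===== PORT B =====
def is_public_py_alt (path : String) : Bool :=
  PySem.Str.startswith path "/api/health" || !(PySem.Str.startswith path "/api/")

-- ===== PRECONDITION & SPEC =====
def Spec_is_public_py (path : String) (out : Bool) : Prop := out = is_public_py_alt path
instance (path : String) (out : Bool) : Decidable (Spec_is_public_py path out) := by unfold Spec_is_public_py; infer_instance

-- ===== CLAIM (what is proved, stated in full; the proofs are below) =====
def Claim_equal_is_public_py : Prop := ∀ (path : String), Dom_is_public_py path → Spec_is_public_py path (is_public_py path)

-- ===== LEMMAS AND PROOFS =====

theorem is_public_eq (path : String) : is_public_py path = is_public_py_alt path := by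
  unfold is_public_py is_public_py_alt pvPublicPrefixes
  by_cases h5 : PySem.Str.startswith path "/api/" = true
  · -- path starts with "/api/": every public entry except "/api/health" is ruled out
    have h5' : ("/api/".toList <+: path.toList) := by
      simpa [PySem.Chars.startswith_iff] using h5
    obtain ⟨t, ht⟩ := h5'
    have hl : path.toList = '/'::'a'::'p'::'i'::'/'::t := by
      simpa using ht.symm
    have hne1 : (path == "/") = false := by
      simp only [beq_eq_false_iff_ne, ne_eq]
      intro h; rw [h] at hl; simp at hl
    have hne2 : (path == "/favicon.ico") = false := by
      simp only [beq_eq_false_iff_ne, ne_eq]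
      intro h; rw [h] at hl; simp at hl
    -- a prefix that disagrees with path at some index cannot match
    have hpre : ∀ (p : String) (i : Nat) (c : Char), p.toList[i]? = some c →
        path.toList[i]? ≠ some c → PySem.Str.startswith path p = false := by
      intro p i c hpc hlc
      rw [← Bool.not_eq_true, PySem.Str.startswith_eq, PySem.Chars.startswith_iff]
      rintro ⟨u, hu⟩
      apply hlc
      rw [← hu, List.getElem?_append_left (List.getElem?_eq_some_iff.mp hpc).1]
      exact hpc
    simp only [List.any_cons, List.any_nil, h5, hne1, hne2,
        hpre "/docs" 1 'd' (by decide) (by rw [hl]; simp),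
        hpre "/openapi.json" 1 'o' (by decide) (by rw [hl]; simp),
        hpre "/redoc" 1 'r' (by decide) (by rw [hl]; simp),
        hpre "/oauth/" 1 'o' (by decide) (by rw [hl]; simp),
        hpre "/l/" 1 'l' (by decide) (by rw [hl]; simp),
        hpre "/assets/" 2 's' (by decide) (by rw [hl]; simp),
        hpre "/uploads/" 1 'u' (by decide) (by rw [hl]; simp)]
    simp
  · -- path does not start with "/api/": both sides are true via the catch-all
    rw [Bool.not_eq_true] at h5
    rw [PySem.Str.startswith_eq] at h5
    simp at h5
    simp [h5]

-- ===== VERDICT (by name: the statement is the Claim_ definition above) =====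
theorem is_public_py_spec : Claim_equal_is_public_py := by
  intro path _
  unfold Spec_is_public_py
  exact is_public_eq path
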